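-- pv_equiv track=rewrite | github.com/rkjones4/TemplatePrograms | executors/shape/shape_utils.py | split_progs
-- ===== SOURCE A (Python) =====
-- def split_progs(ex, expr):
--     local_progs = []
--
--     cur = []
--
--     for token in expr.split()[1:-1]:
--         cur.append(token)
--         if token == 'end':
--             local_progs.append(cur)
--             cur = []
--
--     return local_progs
-- ===== SOURCE B (Python) =====
-- def split_progs(ex, expr):
--     tokens = expr.split()[1:-1]
--     ends = [i for i, t in enumerate(tokens) if t == 'end']
--     res = []
--     prev = 0
--     for i in ends:
--         res.append(tokens[prev:i + 1])
--         prev = i + 1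
--     return res
-- ===== Notes on version B (the rewrite author's own statement) =====
-- stated objective: alternative
-- what changed: Replaces the per-token accumulator loop by an index-first scheme: collect the positions of every 'end' token once, then slice the token list between successive end positions.
import Mathlib
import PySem

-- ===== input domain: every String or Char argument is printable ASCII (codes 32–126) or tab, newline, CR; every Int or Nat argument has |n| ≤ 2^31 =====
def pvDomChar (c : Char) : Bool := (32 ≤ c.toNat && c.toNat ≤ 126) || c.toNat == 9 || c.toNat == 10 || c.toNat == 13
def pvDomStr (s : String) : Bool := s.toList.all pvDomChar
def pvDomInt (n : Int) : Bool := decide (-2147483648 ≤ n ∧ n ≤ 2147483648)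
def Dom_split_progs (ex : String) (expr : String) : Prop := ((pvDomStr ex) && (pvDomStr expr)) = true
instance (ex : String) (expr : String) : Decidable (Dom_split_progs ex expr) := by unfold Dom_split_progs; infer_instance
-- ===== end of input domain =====

-- B differs from A by an index-first decomposition (find 'end' positions, then slice); same cost, no behaviour change.

-- ===== PORT A =====
-- A: one pass, appending each token to `cur` and flushing `cur` at every 'end'.
def split_progs (ex : String) (expr : String) : List (List String) :=
  (((PySem.List.slice (PySem.Str.split₀ expr) (some 1) (some (-1))).foldl
      (fun (st : List (List String) × List String) token =>
        let cur := st.2 ++ [token]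
        if token == "end" then (st.1 ++ [cur], ([] : List String)) else (st.1, cur))
      ([], []))).1

-- ===== PORT B =====
-- B: collect the indices of every 'end' token, then slice between successive end positions.
def split_progs_alt (ex : String) (expr : String) : List (List String) :=
  let tokens := PySem.List.slice (PySem.Str.split₀ expr) (some 1) (some (-1))
  let ends := ((PySem.List.enumerate tokens 0).filter (fun p => p.2 == "end")).map (·.1)
  (ends.foldl
      (fun (st : List (List String) × Int) i =>
        (st.1 ++ [PySem.List.slice tokens (some st.2) (some (i + 1))], i + 1))
      ([], 0)).1

-- ===== PRECONDITION & SPEC =====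
def Spec_split_progs (ex : String) (expr : String) (out : List (List String)) : Prop := out = split_progs_alt ex expr
instance (ex : String) (expr : String) (out : List (List String)) : Decidable (Spec_split_progs ex expr out) := by unfold Spec_split_progs; infer_instance

-- ===== CLAIM (what is proved, stated in full; the proofs are below) =====
def Claim_equal_split_progs : Prop := ∀ (ex : String) (expr : String), Dom_split_progs ex expr → Spec_split_progs ex expr (split_progs ex expr)

-- ===== LEMMAS AND PROOFS =====

/-- Reference chunking: take tokens up to and including each 'end'. -/
def pvCh (cur : List String) : List String → List (List String)
  | [] => []
  | t :: ts => if t = "end" then (cur ++ [t]) :: pvCh [] ts else pvCh (cur ++ [t]) ts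

/-- Indices (offset by `k`) of the 'end' tokens. -/
def pvEnds (k : Int) : List String → List Int
  | [] => []
  | t :: ts => if t = "end" then k :: pvEnds (k + 1) ts else pvEnds (k + 1) ts

/-- B's slicing loop, result part only. -/
def pvBgo (tokens : List String) (prev : Int) : List Int → List (List String)
  | [] => []
  | i :: rest => PySem.List.slice tokens (some prev) (some (i + 1)) :: pvBgo tokens (i + 1) rest

theorem pvA_foldl (ts : List String) (p : List (List String)) (c : List String) :
    (ts.foldl
      (fun (st : List (List String) × List String) token =>
        let cur := st.2 ++ [token]
        if token == "end" then (st.1 ++ [cur], ([] : List String)) else (st.1, cur))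
      (p, c)).1 = p ++ pvCh c ts := by
  induction ts generalizing p c with
  | nil => simp [pvCh]
  | cons t ts ih =>
    rw [List.foldl_cons]
    by_cases h : t = "end"
    · simp only [show (t == "end") = true by simp [h], if_true]
      rw [ih]
      simp [pvCh, h]
    · simp only [show (t == "end") = false by simp [h], if_false, Bool.false_eq_true]
      rw [ih]
      simp [pvCh, h]

theorem pvB_foldl (tokens : List String) (ends : List Int) (acc : List (List String)) (prev : Int) :
    (ends.foldl
      (fun (st : List (List String) × Int) i =>
        (st.1 ++ [PySem.List.slice tokens (some st.2) (some (i + 1))], i + 1))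
      (acc, prev)).1 = acc ++ pvBgo tokens prev ends := by
  induction ends generalizing acc prev with
  | nil => simp [pvBgo]
  | cons i rest ih => simp [pvBgo, ih]

theorem pvEnds_eq (ts : List String) (k : Int) :
    ((PySem.List.enumerate ts k).filter (fun p => p.2 == "end")).map (·.1) = pvEnds k ts := by
  induction ts generalizing k with
  | nil => simp [PySem.List.enumerate_nil, pvEnds]
  | cons t ts ih =>
    by_cases h : t = "end" <;>
      simp [PySem.List.enumerate_cons, h, pvEnds, ih]

theorem pvMain (ts : List String) (pre : List String) (prev : Nat) (h : prev ≤ pre.length) :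
    pvBgo (pre ++ ts) (prev : Int) (pvEnds (pre.length : Int) ts) = pvCh (pre.drop prev) ts := by
  induction ts generalizing pre prev with
  | nil => simp [pvEnds, pvBgo, pvCh]
  | cons t ts ih =>
    have e1 : pre ++ t :: ts = (pre ++ [t]) ++ ts := by simp
    have e2 : ((pre.length : Int) + 1) = (((pre ++ [t]).length : Nat) : Int) := by
      simp
    by_cases hend : t = "end"
    · subst hend
      have hslice :
          PySem.List.slice (pre ++ "end" :: ts) (some (prev : Int)) (some ((pre.length : Int) + 1))
            = pre.drop prev ++ ["end"] := by
        have hc : ((pre.length : Int) + 1) = ((pre.length + 1 : Nat) : Int) := by push_cast; ring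
        rw [hc, PySem.List.slice_natCast, List.drop_append_of_le_length h, List.take_append]
        have hlen : (pre.drop prev).length = pre.length - prev := by simp
        have h1 : (pre.drop prev).take (pre.length + 1 - prev) = pre.drop prev := by
          apply List.take_of_length_le; omega
        have h2 : pre.length + 1 - prev - (pre.drop prev).length = 1 := by rw [hlen]; omega
        rw [h1, h2]
        simp
      have hrest :
          pvBgo (pre ++ "end" :: ts) ((pre.length : Int) + 1) (pvEnds ((pre.length : Int) + 1) ts)
            = pvCh [] ts := by
        rw [e1, e2]
        simpa using ih (pre ++ ["end"]) (pre ++ ["end"]).length (le_refl _)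
      simp only [pvEnds, pvCh, if_true, pvBgo]
      rw [hslice, hrest]
    · simp only [pvEnds, pvCh, hend, if_false]
      rw [e1, e2, ih (pre ++ [t]) prev (by simp; omega), List.drop_append_of_le_length h]

-- ===== VERDICT (by name: the statement is the Claim_ definition above) =====
theorem split_progs_spec : Claim_equal_split_progs := by
  intro ex expr _
  unfold Spec_split_progs split_progs split_progs_alt
  rw [pvA_foldl, pvB_foldl, pvEnds_eq]
  have := pvMain (PySem.List.slice (PySem.Str.split₀ expr) (some 1) (some (-1))) [] 0 (by simp)
  simpa using this.symm
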